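-- pv_equiv track=rewrite | github.com/xapatjb4/AlgoDataStruct | python/IkAlgs/rand/add2arr.py | add2Arr
-- ===== SOURCE A (Python) =====
-- def add2Arr(arr1, arr2):
--     shortArr = longArr = []
--     if len(arr1) < len(arr2):
--         shortArr = arr1
--         longArr = arr2
--     else:
--         shortArr = arr2
--         longArr = arr1
--     ans = []
--     for x in range(len(longArr)):
--         sum = longArr[x]
--         if x < len(shortArr):
--             sum += shortArr[x]
--         if sum > 9:
--             splitSum(ans, sum)
--         else:
--             ans.append(sum)
--     return ans
--
-- def splitSum(arr, sum):
--     lst = []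
--     while sum > 0:
--         lst.append(sum % 10)
--         sum = sum // 10
--     for x in range(len(lst)-1, -1, -1):
--         arr.append(lst[x])
-- ===== SOURCE B (Python) =====
-- from itertools import zip_longest
--
-- def _digits(s):
--     # decimal digits of s, MSB first; a single-digit (or non-positive) value stays as-is
--     return _digits(s // 10) + [s % 10] if s > 9 else [s]
--
-- def add2Arr(arr1, arr2):
--     return [d for a, b in zip_longest(arr1, arr2, fillvalue=0) for d in _digits(a + b)]
-- ===== Notes on version B (the rewrite author's own statement) =====
-- stated objective: simpler
-- what changed: Replaced A's length-comparison/short-long split, index loop with a range guard, and the LSB-digit-collect-then-reverse helper by a single zip_longest(fillvalue=0) pass whose sums are flattened with a recursive MSB-first digit expansion.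
import Mathlib
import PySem

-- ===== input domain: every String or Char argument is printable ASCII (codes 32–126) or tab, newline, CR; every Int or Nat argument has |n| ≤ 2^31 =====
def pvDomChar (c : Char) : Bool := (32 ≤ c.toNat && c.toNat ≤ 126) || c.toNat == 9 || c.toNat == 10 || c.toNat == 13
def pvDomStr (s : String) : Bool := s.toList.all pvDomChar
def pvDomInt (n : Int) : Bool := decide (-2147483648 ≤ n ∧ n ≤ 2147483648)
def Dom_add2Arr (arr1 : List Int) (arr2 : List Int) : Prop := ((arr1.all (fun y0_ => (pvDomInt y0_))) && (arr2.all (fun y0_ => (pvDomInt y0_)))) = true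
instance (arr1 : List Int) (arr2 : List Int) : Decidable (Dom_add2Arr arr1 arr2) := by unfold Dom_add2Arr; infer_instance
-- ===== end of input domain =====

-- B replaces A's length-comparison + index loop + digit helper by a zip_longest pass and a
-- recursive MSB-first digit expansion (objective: simpler).

-- ===== PORT A =====
-- splitSum's 'while sum > 0: lst.append(sum % 10); sum //= 10'
def splitCollect (s : Int) (lst : List Int) : List Int :=
  if _h : s > 0 then
    splitCollect (PySem.Int.floordiv s 10) (lst ++ [PySem.Int.mod s 10])
  else lst
termination_by s.toNat
decreasing_by
  rw [PySem.Int.floordiv_eq_ediv_of_pos (by omega : (0:Int) < 10)]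
  omega

-- splitSum(arr, sum): collect digits LSB-first, then append them in reverse index order
def splitSum (arr : List Int) (s : Int) : List Int :=
  let lst := splitCollect s []
  (PySem.List.pyRange (PySem.List.len lst - 1) (-1) (-1)).foldl
    (fun acc x => acc ++ [PySem.List.pyGetD lst x 0]) arr

def add2Arr (arr1 : List Int) (arr2 : List Int) : List Int :=
  let sl := if PySem.List.len arr1 < PySem.List.len arr2 then (arr1, arr2) else (arr2, arr1)
  (PySem.List.pyRange 0 (PySem.List.len sl.2) 1).foldl
    (fun ans x =>
      let sum := PySem.List.pyGetD sl.2 x 0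
      let sum := if x < PySem.List.len sl.1 then sum + PySem.List.pyGetD sl.1 x 0 else sum
      if sum > 9 then splitSum ans sum else ans ++ [sum]) []

-- ===== PORT B =====
-- _digits(s): decimal digits MSB-first by recursion; single-digit (or non-positive) stays as-is
def altDigits (s : Int) : List Int :=
  if _h : s > 9 then altDigits (PySem.Int.floordiv s 10) ++ [PySem.Int.mod s 10] else [s]
termination_by s.toNat
decreasing_by
  rw [PySem.Int.floordiv_eq_ediv_of_pos (by omega : (0:Int) < 10)]
  omega

-- itertools.zip_longest(arr1, arr2, fillvalue=0)
def zipLongest0 : List Int → List Int → List (Int × Int)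
  | [], [] => []
  | a :: as, [] => (a, 0) :: zipLongest0 as []
  | [], b :: bs => (0, b) :: zipLongest0 [] bs
  | a :: as, b :: bs => (a, b) :: zipLongest0 as bs

def add2Arr_alt (arr1 : List Int) (arr2 : List Int) : List Int :=
  (zipLongest0 arr1 arr2).flatMap (fun p => altDigits (p.1 + p.2))

-- ===== PRECONDITION & SPEC =====
def Spec_add2Arr (arr1 : List Int) (arr2 : List Int) (out : List Int) : Prop := out = add2Arr_alt arr1 arr2
instance (arr1 : List Int) (arr2 : List Int) (out : List Int) : Decidable (Spec_add2Arr arr1 arr2 out) := by unfold Spec_add2Arr; infer_instance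

-- ===== CLAIM (what is proved, stated in full; the proofs are below) =====
def Claim_equal_add2Arr : Prop := ∀ (arr1 : List Int) (arr2 : List Int), Dom_add2Arr arr1 arr2 → Spec_add2Arr arr1 arr2 (add2Arr arr1 arr2)

-- ===== LEMMAS AND PROOFS =====

lemma splitCollect_neg (s : Int) (lst : List Int) (h : ¬ s > 0) : splitCollect s lst = lst := by
  rw [splitCollect]; simp [h]
lemma splitCollect_pos (s : Int) (lst : List Int) (h : s > 0) :
    splitCollect s lst = splitCollect (PySem.Int.floordiv s 10) (lst ++ [PySem.Int.mod s 10]) := by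
  rw [splitCollect]; simp [h]
lemma altDigits_le (s : Int) (h : ¬ s > 9) : altDigits s = [s] := by
  rw [altDigits]; simp [h]
lemma altDigits_gt (s : Int) (h : s > 9) :
    altDigits s = altDigits (PySem.Int.floordiv s 10) ++ [PySem.Int.mod s 10] := by
  rw [altDigits]; simp [h]

lemma splitCollect_append : ∀ (n : Nat) (s : Int), s.toNat ≤ n → ∀ lst,
    splitCollect s lst = lst ++ splitCollect s [] := by
  intro n
  induction n with
  | zero =>
    intro s hs lst
    have h : ¬ s > 0 := by omega
    rw [splitCollect_neg s lst h, splitCollect_neg s [] h]; simp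
  | succ n ih =>
    intro s hs lst
    by_cases h : s > 0
    · have hd : (PySem.Int.floordiv s 10).toNat ≤ n := by
        rw [PySem.Int.floordiv_eq_ediv_of_pos (by omega : (0:Int) < 10)]; omega
      rw [splitCollect_pos s lst h, splitCollect_pos s [] h,
        ih _ hd (lst ++ [PySem.Int.mod s 10]), ih _ hd ([] ++ [PySem.Int.mod s 10])]
      simp
    · rw [splitCollect_neg s lst h, splitCollect_neg s [] h]; simp

lemma splitCollect_reverse : ∀ (n : Nat) (s : Int), s.toNat ≤ n → 0 < s →
    (splitCollect s []).reverse = altDigits s := by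
  intro n
  induction n with
  | zero => intro s hs hp; omega
  | succ n ih =>
    intro s hs hp
    have hdn : (PySem.Int.floordiv s 10).toNat ≤ n := by
      rw [PySem.Int.floordiv_eq_ediv_of_pos (by omega : (0:Int) < 10)]; omega
    rw [splitCollect_pos s [] hp, splitCollect_append n _ hdn ([] ++ [PySem.Int.mod s 10])]
    simp only [List.nil_append, List.reverse_append, List.reverse_cons, List.reverse_nil,
      List.nil_append]
    by_cases h9 : s > 9
    · have ht : 0 < PySem.Int.floordiv s 10 := by
        rw [PySem.Int.floordiv_eq_ediv_of_pos (by omega : (0:Int) < 10)]; omega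
      rw [altDigits_gt s h9, ih _ hdn ht]
    · have ht : ¬ PySem.Int.floordiv s 10 > 0 := by
        rw [PySem.Int.floordiv_eq_ediv_of_pos (by omega : (0:Int) < 10)]; omega
      have hm : PySem.Int.mod s 10 = s := by
        rw [PySem.Int.mod_eq_emod_of_pos (by omega : (0:Int) < 10)]; omega
      rw [splitCollect_neg _ [] ht, altDigits_le s h9, hm]
      simp

lemma splitSum_eq (arr : List Int) (s : Int) (hs : 0 < s) :
    splitSum arr s = arr ++ altDigits s := by
  simp only [splitSum]
  rw [PySem.List.pyRange_neg_one_eq_reverse]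
  have h1 : (-1 : Int) + 1 = 0 := by norm_num
  have h2 : PySem.List.len (splitCollect s []) - 1 + 1 = PySem.List.len (splitCollect s []) := by ring
  rw [h1, h2, PySem.List.foldl_append_singleton_eq_map, List.map_reverse,
    PySem.List.len_eq, PySem.List.map_pyGetD_pyRange_zero']
  rw [splitCollect_reverse s.toNat s le_rfl hs]


lemma zip_sum_swap : ∀ (a b : List Int),
    (zipLongest0 a b).map (fun p => p.1 + p.2) = (zipLongest0 b a).map (fun p => p.1 + p.2) := by
  intro a
  induction a with
  | nil =>
    intro b
    induction b with
    | nil => rfl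
    | cons x xs ih =>
      simp only [zipLongest0, List.map_cons, ih]
      congr 1
      ring
  | cons x xs ih =>
    intro b
    cases b with
    | nil =>
      simp only [zipLongest0, List.map_cons, ih []]
      congr 1
      ring
    | cons y ys =>
      simp only [zipLongest0, List.map_cons, ih ys]
      congr 1
      ring

lemma sums_eq : ∀ (long short : List Int), short.length ≤ long.length →
    (List.range long.length).map
      (fun i => if i < short.length then long.getD i 0 + short.getD i 0 else long.getD i 0)
    = (zipLongest0 short long).map (fun p => p.1 + p.2) := by
  intro long
  induction long with
  | nil =>
    intro short h
    have hs : short = [] := by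
      cases short with
      | nil => rfl
      | cons a as => simp at h
    subst hs
    simp [zipLongest0]
  | cons l ls ih =>
    intro short h
    cases short with
    | nil =>
      simp only [List.length_cons, List.range_succ_eq_map, List.map_cons, List.map_map, zipLongest0]
      congr 1
      · simp
      · rw [← ih [] (by simp)]
        refine List.map_congr_left fun i hi => ?_
        simp
    | cons s ss =>
      simp only [List.length_cons, List.range_succ_eq_map, List.map_cons, List.map_map, zipLongest0]
      congr 1
      · simp
        ring
      · rw [← ih ss (by simp at h ⊢; omega)]
        refine List.map_congr_left fun i hi => ?_
        simp

lemma core (long short : List Int) (h : short.length ≤ long.length) :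
    (PySem.List.pyRange 0 (PySem.List.len long) 1).foldl
      (fun ans x =>
        let sum := PySem.List.pyGetD long x 0
        let sum := if x < PySem.List.len short then sum + PySem.List.pyGetD short x 0 else sum
        if sum > 9 then splitSum ans sum else ans ++ [sum]) []
    = ((zipLongest0 short long).map (fun p => p.1 + p.2)).flatMap altDigits := by
  rw [PySem.List.foldl_congr_mem _ _
      (fun ans x => ans ++ altDigits (if x < PySem.List.len short then
        PySem.List.pyGetD long x 0 + PySem.List.pyGetD short x 0 else PySem.List.pyGetD long x 0)) _
      (by
        intro acc x _
        simp only []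
        by_cases h9 : (if x < PySem.List.len short then
            PySem.List.pyGetD long x 0 + PySem.List.pyGetD short x 0
          else PySem.List.pyGetD long x 0) > 9
        · rw [if_pos h9, splitSum_eq _ _ (by omega)]
        · rw [if_neg h9, altDigits_le _ h9])]
  rw [PySem.List.foldl_append_eq_flatMap, List.nil_append]
  simp only [PySem.List.len_eq]
  rw [
    PySem.List.pyRange_zero_natCast, List.flatMap_map, ← sums_eq long short h, List.flatMap_map]
  refine congrArg (fun f => List.flatMap f (List.range long.length)) (funext fun i => ?_)
  simp [PySem.List.pyGetD_natCast]

lemma alt_eq_sums (a b : List Int) :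
    add2Arr_alt a b = ((zipLongest0 a b).map (fun p => p.1 + p.2)).flatMap altDigits := by
  unfold add2Arr_alt
  rw [List.flatMap_map]

-- ===== VERDICT (by name: the statement is the Claim_ definition above) =====
theorem add2Arr_spec : Claim_equal_add2Arr := by
  intro arr1 arr2 _dom
  unfold Spec_add2Arr add2Arr
  by_cases hlt : PySem.List.len arr1 < PySem.List.len arr2
  · simp only [hlt, if_pos]
    rw [core arr2 arr1 (by simp [PySem.List.len_eq] at hlt; omega), ← alt_eq_sums]
  · simp only [hlt, if_neg, not_false_iff]
    rw [core arr1 arr2 (by simp [PySem.List.len_eq] at hlt; omega), zip_sum_swap, ← alt_eq_sums]
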